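-- pv_equiv track=rewrite | github.com/rf-iasys/OEIS | OEIS_A140660.py | A140660
-- ===== SOURCE A (Python) =====
-- def A140660(n):
--     marked = []
--     current = 1
--     k = 2
--
--     while len(marked) < n:
--         k += current//2 + k
--         current += current + 2*k
--         marked.append(k)
--
--     return marked
-- ===== SOURCE B (Python) =====
-- def A140660(n):
--     return [(3 << 2*i) + 1 for i in range(n)]
-- ===== Notes on version B (the rewrite author's own statement) =====
-- stated objective: alternative
-- what changed: Replaces the while-loop propagating the coupled big-int state (current, k) with a list comprehension over range(n) computing each term directly from the closed form (3 << 2*i) + 1.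
import Mathlib
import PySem

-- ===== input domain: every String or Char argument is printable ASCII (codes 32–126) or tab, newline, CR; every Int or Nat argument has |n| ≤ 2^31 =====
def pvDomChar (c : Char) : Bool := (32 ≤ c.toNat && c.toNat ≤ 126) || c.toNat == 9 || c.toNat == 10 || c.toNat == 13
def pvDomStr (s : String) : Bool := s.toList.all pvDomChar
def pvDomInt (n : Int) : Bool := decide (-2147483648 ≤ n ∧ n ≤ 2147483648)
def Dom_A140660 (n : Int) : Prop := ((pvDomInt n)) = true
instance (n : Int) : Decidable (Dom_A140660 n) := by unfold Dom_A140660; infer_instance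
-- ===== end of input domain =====

-- B replaces A's stateful while loop over the coupled pair (current, k) by a
-- comprehension over range(n) using the closed form (3 << 2*i) + 1 (objective: alternative).

-- ===== PORT A =====
-- while len(marked) < n: k += current//2 + k; current += current + 2*k; marked.append(k)
-- fuel is only a totality guard: starting from marked = [] the while loop runs
-- exactly n.toNat iterations (one append per iteration), so fuel never runs out first.
def A140660_loop (n : Int) (fuel : Nat) (marked : List Int) (current k : Int) : List Int :=
  match fuel with
  | 0 => marked
  | f + 1 =>
    if (marked.length : Int) < n then
      let k' := k + (PySem.Int.floordiv current 2 + k)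
      let current' := current + (current + 2 * k')
      A140660_loop n f (marked ++ [k']) current' k'
    else marked

def A140660 (n : Int) : List Int := A140660_loop n n.toNat [] 1 2

-- ===== PORT B =====
-- [(3 << 2*i) + 1 for i in range(n)]; Python's << on ints is Lean's <<< (shift
-- amount as Nat; every i produced by range(n) is ≥ 0, so (2*i).toNat is exact).
def A140660_alt (n : Int) : List Int :=
  (PySem.List.pyRange 0 n 1).map (fun i => ((3 : Int) <<< (2 * i).toNat) + 1)

-- ===== PRECONDITION & SPEC =====
def Spec_A140660 (n : Int) (out : List Int) : Prop := out = A140660_alt n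
instance (n : Int) (out : List Int) : Decidable (Spec_A140660 n out) := by unfold Spec_A140660; infer_instance

-- ===== CLAIM (what is proved, stated in full; the proofs are below) =====
def Claim_equal_A140660 : Prop := ∀ (n : Int), Dom_A140660 n → Spec_A140660 n (A140660 n)

-- ===== LEMMAS AND PROOFS =====

-- A's loop state before iteration i (i = number of elements appended so far).
def pvCur (i : Nat) : Int := if i = 0 then 1 else 3 * 4 ^ i - 2
def pvK (i : Nat) : Int := if i = 0 then 2 else 3 * 4 ^ (i - 1) + 1

lemma pvK_step (i : Nat) :
    pvK i + (PySem.Int.floordiv (pvCur i) 2 + pvK i) = 3 * 4 ^ i + 1 := by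
  rcases Nat.eq_zero_or_pos i with h | h
  · subst h; simp [pvK, pvCur]
  · obtain ⟨j, rfl⟩ : ∃ j, i = j + 1 := ⟨i - 1, by omega⟩
    simp only [pvK, pvCur, Nat.add_sub_cancel, if_neg (Nat.succ_ne_zero j)]
    have h2 : (3 * 4 ^ (j + 1) - 2 : Int) = (6 * 4 ^ j - 1) * 2 := by ring
    rw [h2, PySem.Int.floordiv_eq_ediv_of_pos (by omega), Int.mul_ediv_cancel _ (by omega)]
    ring

lemma pvCur_step (i : Nat) :
    pvCur i + (pvCur i + 2 * (3 * 4 ^ i + 1)) = pvCur (i + 1) := by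
  rcases Nat.eq_zero_or_pos i with h | h
  · subst h; simp [pvCur]
  · simp only [pvCur, if_neg (by omega : ¬ i = 0), if_neg (Nat.succ_ne_zero i)]
    ring

lemma pvK_succ (i : Nat) : pvK (i + 1) = 3 * 4 ^ i + 1 := by
  simp [pvK]

-- A's loop, started i elements in with the matching state, emits the terms
-- 3*4^j + 1 for the remaining indices j = i, …, i+fuel-1.
lemma loop_eq (n : Int) (fuel : Nat) : ∀ (i : Nat) (marked : List Int),
    marked.length = i → (i : Int) + fuel = n.toNat →
    A140660_loop n fuel marked (pvCur i) (pvK i)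
      = marked ++ (List.range' i fuel).map (fun j => 3 * 4 ^ j + 1) := by
  induction fuel with
  | zero => intro i marked _ _; simp [A140660_loop]
  | succ f ih =>
    intro i marked hlen hfuel
    have hn : (marked.length : Int) < n := by omega
    rw [A140660_loop]
    simp only [hn, if_true]
    rw [pvK_step, pvCur_step, ← pvK_succ]
    rw [ih (i + 1) (marked ++ [pvK (i + 1)]) (by simp [hlen]) (by push_cast; omega)]
    simp [List.range'_succ, pvK_succ]

-- ===== VERDICT (by name: the statement is the Claim_ definition above) =====
theorem A140660_spec : Claim_equal_A140660 := by
  intro n _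
  show A140660 n = A140660_alt n
  unfold A140660 A140660_alt
  have h := loop_eq n n.toNat 0 [] rfl (by simp)
  norm_num [pvCur, pvK] at h
  rw [h, PySem.List.pyRange_one, List.range_eq_range']
  simp only [List.map_map, Int.sub_zero]
  refine (List.map_congr_left ?_).symm
  intro a _
  have h2 : ((2 : Int) * ((0 : Int) + (a : Int))).toNat = 2 * a := by omega
  simp only [Function.comp, h2]
  rw [Int.shiftLeft_eq_mul_pow 3 (2 * a)]
  push_cast
  rw [pow_mul]
  norm_num
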